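-- pv_equiv track=rewrite | github.com/Patautista/godel-to-text | godel.py | inverse_pair
-- ===== SOURCE A (Python) =====
-- def inverse_pair(result):
--     result += 1
--     x = 0
--     while result % 2 == 0:
--         result //= 2
--         x += 1
--     y = (result + 1) // 2 - 1
--     if(y < 0):
--         y = 0
--     return x, y
-- ===== SOURCE B (Python) =====
-- def inverse_pair(result):
--     n = result + 1
--     x = (n & -n).bit_length() - 1
--     odd = n >> x
--     y = (odd + 1) // 2 - 1
--     return (x, 0 if y < 0 else y)
-- ===== Notes on version B (the rewrite author's own statement) =====
-- stated objective: alternative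
-- what changed: A's repeated-halving while loop is replaced by a loop-free bit computation: the power-of-2 exponent is read off as (n & -n).bit_length() - 1 and the odd part obtained by a single right shift.
-- outside the precondition, e.g. on inverse_pair(-1): A does not finish within the time limit, B raises ValueError
import Mathlib
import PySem

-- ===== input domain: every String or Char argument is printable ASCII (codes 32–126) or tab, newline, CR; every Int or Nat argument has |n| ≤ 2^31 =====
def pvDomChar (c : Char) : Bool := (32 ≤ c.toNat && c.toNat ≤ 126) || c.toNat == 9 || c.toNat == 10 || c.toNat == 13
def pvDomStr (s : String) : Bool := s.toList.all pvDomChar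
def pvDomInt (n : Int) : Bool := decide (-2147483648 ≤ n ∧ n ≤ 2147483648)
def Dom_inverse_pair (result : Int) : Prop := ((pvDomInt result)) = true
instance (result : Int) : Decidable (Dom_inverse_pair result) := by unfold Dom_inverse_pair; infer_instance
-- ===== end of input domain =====

-- B replaces A's halving loop by a closed-form bit computation (lowest set bit via n & -n and bit_length), an alternative algorithm of similar cost.

-- ===== PORT A =====
-- termination measure for the loop below (cited by name in its decreasing_by)
theorem pv_loop_dec (n : Int) (h : n ≠ 0 ∧ PySem.Int.mod n 2 = 0) :
    (PySem.Int.floordiv n 2).natAbs < n.natAbs := by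
  obtain ⟨h1, h2⟩ := h
  rw [PySem.Int.floordiv_eq_ediv_of_pos (by decide)]
  rw [PySem.Int.mod_eq_emod_of_pos (by decide)] at h2
  have hd : (2 : Int) ∣ n := Int.dvd_of_emod_eq_zero h2
  have h3 : n / 2 * 2 = n := Int.ediv_mul_cancel hd
  have h4 : (n / 2).natAbs * 2 = n.natAbs := by
    rw [show (2 : Nat) = (2 : Int).natAbs from rfl, ← Int.natAbs_mul, h3]
  have hb : n.natAbs ≠ 0 := Int.natAbs_ne_zero.mpr h1
  have ha : (n / 2).natAbs ≠ 0 := fun h0 => hb (by rw [← h4, h0])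
  have hlt : (n / 2).natAbs < (n / 2).natAbs * 2 := by
    rw [Nat.mul_two]
    exact Nat.lt_add_of_pos_left (Nat.pos_of_ne_zero ha)
  exact h4 ▸ hlt

-- the while loop; the `n ≠ 0` conjunct is only a totality guard: Python loops forever at n = 0
-- (result = -1), which Pre_ excludes
def inverse_pair_loop (n : Int) (x : Int) : Int × Int :=
  if h : n ≠ 0 ∧ PySem.Int.mod n 2 = 0 then
    inverse_pair_loop (PySem.Int.floordiv n 2) (x + 1)
  else (x, n)
termination_by n.natAbs
decreasing_by exact pv_loop_dec n h

def inverse_pair (result : Int) : Int × Int :=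
  let r := result + 1
  let p := inverse_pair_loop r 0
  let y := PySem.Int.floordiv (p.2 + 1) 2 - 1
  (p.1, if y < 0 then 0 else y)

-- ===== PORT B =====
def inverse_pair_alt (result : Int) : Int × Int :=
  let n := result + 1
  let x : Int := (PySem.Int.bitLength (PySem.Int.band n (-n)) : Int) - 1
  -- Python's n >> x; the shift amount x.toNat is exact since x ≥ 0 whenever n ≠ 0
  -- (at result = -1 Python raises ValueError on the negative shift; excluded by Pre_)
  let odd := n >>> x.toNat
  let y := PySem.Int.floordiv (odd + 1) 2 - 1
  (x, if y < 0 then 0 else y)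

-- ===== PRECONDITION & SPEC =====
-- Pre_ excludes only result = -1, on which A loops forever (result+1 = 0 stays even) and B raises ValueError.
def Pre_inverse_pair (result : Int) : Prop := result ≠ -1
instance (result : Int) : Decidable (Pre_inverse_pair result) := by unfold Pre_inverse_pair; infer_instance
def pvWitness_inverse_pair : Int := 7

def Spec_inverse_pair (result : Int) (out : Int × Int) : Prop := out = inverse_pair_alt result
instance (result : Int) (out : Int × Int) : Decidable (Spec_inverse_pair result out) := by unfold Spec_inverse_pair; infer_instance

-- ===== CLAIM (what is proved, stated in full; the proofs are below) =====
def Claim_equal_inverse_pair : Prop := ∀ (result : Int), Dom_inverse_pair result → Pre_inverse_pair result → Spec_inverse_pair result (inverse_pair result)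

-- ===== LEMMAS AND PROOFS =====

-- number of trailing zero bits (proof-only helper)
def pvTz (m : Nat) : Nat :=
  if h : m ≠ 0 ∧ m % 2 = 0 then pvTz (m / 2) + 1 else 0
termination_by m
decreasing_by omega

theorem pvTz_odd (m : Nat) (h : m % 2 = 1) : pvTz m = 0 := by
  rw [pvTz]; simp [h]

theorem pvTz_even (m : Nat) (h0 : m ≠ 0) (h2 : m % 2 = 0) : pvTz m = pvTz (m / 2) + 1 := by
  rw [pvTz]; simp [h0, h2]

theorem land_even_odd (a b : Nat) : (2 * a) &&& (2 * b + 1) = 2 * (a &&& b) := by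
  apply Nat.eq_of_testBit_eq
  intro i
  cases i with
  | zero =>
      rw [Nat.testBit_land, Nat.testBit_zero, Nat.testBit_zero, Nat.testBit_zero]
      have e1 : (2 * a) % 2 = 0 := by omega
      have e2 : (2 * (a &&& b)) % 2 = 0 := by omega
      simp [e1, e2]
  | succ i =>
      have h1 : 2 * a / 2 = a := by omega
      have h2 : (2 * b + 1) / 2 = b := by omega
      have h3 : 2 * (a &&& b) / 2 = a &&& b := by omega
      rw [Nat.testBit_land, Nat.testBit_succ, Nat.testBit_succ, Nat.testBit_succ, h1, h2, h3,
        Nat.testBit_land]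

theorem land_odd_even (a b : Nat) : (2 * a + 1) &&& (2 * b) = 2 * (a &&& b) := by
  rw [Nat.land_comm, land_even_odd, Nat.land_comm]

-- the lowest set bit of m, written as m - (m &&& (m-1)), is 2 ^ (trailing zeros)
theorem lowbit_eq_pow (m : Nat) (h : m ≠ 0) : m - (m &&& (m - 1)) = 2 ^ (pvTz m) := by
  induction m using Nat.strong_induction_on with
  | _ m ih =>
    rcases Nat.even_or_odd m with he | ho
    · -- m even, m = 2k with k ≠ 0
      obtain ⟨k, hk⟩ := he
      have hk2 : m = 2 * k := by omega
      have hk0 : k ≠ 0 := by omega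
      have hlt : k < m := by omega
      have hml : m - 1 = 2 * (k - 1) + 1 := by omega
      have hland : m &&& (m - 1) = 2 * (k &&& (k - 1)) := by
        rw [hml, hk2, land_even_odd]
      have hle : k &&& (k - 1) ≤ k := Nat.and_le_left
      have hrec := ih k hlt hk0
      have hmk : m / 2 = k := by omega
      have htz : pvTz m = pvTz k + 1 := by
        rw [pvTz_even m h (by omega), hmk]
      rw [hland, htz, pow_succ]
      omega
    · -- m odd, m = 2k+1
      obtain ⟨k, hk⟩ := ho
      have hml : m - 1 = 2 * k := by omega
      have hland : m &&& (m - 1) = 2 * (k &&& k) := by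
        rw [hml, hk, land_odd_even]
      rw [Nat.and_self] at hland
      rw [pvTz_odd m (by omega), hland]
      omega

-- PySem.Int.band n (-n) is the lowest-bit expression over n.natAbs, for either sign of n
theorem band_neg_self (n : Int) (h : n ≠ 0) :
    PySem.Int.band n (-n) = ((n.natAbs - (n.natAbs &&& (n.natAbs - 1)) : Nat) : Int) := by
  cases n with
  | ofNat m =>
      have hm : m ≠ 0 := by simpa using h
      have h1 : (0 : Int) ≤ Int.ofNat m := Int.natCast_nonneg m
      have h2 : ¬ (0 : Int) ≤ -Int.ofNat m := by
        simp only [Int.ofNat_eq_natCast]; omega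
      simp only [PySem.Int.band, h1, h2, if_true, if_false]
      have e1 : (Int.ofNat m).toNat = m := rfl
      have e2 : (-(-Int.ofNat m) - 1).toNat = m - 1 := by
        simp only [Int.ofNat_eq_natCast]; omega
      rw [e1, e2]; rfl
  | negSucc m =>
      have h1 : ¬ (0 : Int) ≤ Int.negSucc m := by
        simp only [Int.negSucc_eq]; omega
      have h2 : (0 : Int) ≤ -Int.negSucc m := by
        simp only [Int.negSucc_eq]; omega
      simp only [PySem.Int.band, h1, h2, if_true, if_false]
      have e1 : (-Int.negSucc m).toNat = m + 1 := by
        simp only [Int.negSucc_eq]; omega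
      have e2 : (-Int.negSucc m - 1).toNat = m := by
        simp only [Int.negSucc_eq]; omega
      have e3 : (Int.negSucc m).natAbs = m + 1 := rfl
      rw [e1, e2, e3]
      simp

theorem bitLength_pow (t : Nat) : PySem.Int.bitLength ((2 ^ t : Nat) : Int) = t + 1 := by
  induction t with
  | zero =>
      rw [PySem.Int.bitLength_natCast (by norm_num)]
      norm_num
  | succ t ih =>
      rw [PySem.Int.bitLength_natCast (by positivity)]
      have : 2 ^ (t + 1) / 2 = 2 ^ t := by
        rw [pow_succ]; omega
      rw [this, ih]

-- B's exponent is the trailing-zero count of |n|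
theorem alt_x_eq (n : Int) (h : n ≠ 0) :
    (PySem.Int.bitLength (PySem.Int.band n (-n)) : Int) - 1 = (pvTz n.natAbs : Int) := by
  rw [band_neg_self n h, lowbit_eq_pow n.natAbs (by omega), bitLength_pow]
  push_cast
  ring

theorem fdiv_two_ofNat (m : Nat) : PySem.Int.floordiv (Int.ofNat m) 2 = Int.ofNat (m / 2) := by
  simp only [PySem.Int.floordiv, Int.fdiv_eq_ediv, Int.ofNat_eq_natCast]
  omega

theorem fdiv_two_negSucc (m : Nat) : PySem.Int.floordiv (Int.negSucc m) 2 = Int.negSucc (m / 2) := by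
  simp only [PySem.Int.floordiv, Int.fdiv_eq_ediv, Int.negSucc_eq]
  omega

theorem nat_shiftRight_succ (m k : Nat) : m >>> (k + 1) = (m / 2) >>> k := by
  simp only [Nat.shiftRight_eq_div_pow]
  rw [Nat.div_div_eq_div_mul]
  congr 1
  rw [pow_succ']

theorem shiftRight_succ_fdiv (n : Int) (k : Nat) :
    n >>> (k + 1) = (PySem.Int.floordiv n 2) >>> k := by
  cases n with
  | ofNat m =>
      rw [fdiv_two_ofNat]
      show Int.ofNat (m >>> (k + 1)) = Int.ofNat ((m / 2) >>> k)
      rw [nat_shiftRight_succ]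
  | negSucc m =>
      rw [fdiv_two_negSucc]
      show Int.negSucc (m >>> (k + 1)) = Int.negSucc ((m / 2) >>> k)
      rw [nat_shiftRight_succ]

theorem mod_two_eq (n : Int) : PySem.Int.mod n 2 = n % 2 := by
  simp [PySem.Int.mod, Int.fmod_eq_emod]

theorem floordiv_two_eq (n : Int) : PySem.Int.floordiv n 2 = n / 2 := by
  simp [PySem.Int.floordiv, Int.fdiv_eq_ediv]

-- A's loop computes exactly B's closed-form pair
theorem loop_eq (m : Nat) : ∀ (n x : Int), n ≠ 0 → n.natAbs = m →
    inverse_pair_loop n x = (x + (pvTz m : Int), n >>> pvTz m) := by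
  induction m using Nat.strong_induction_on with
  | _ m ih =>
    intro n x hn hm
    rw [inverse_pair_loop]
    by_cases hev : PySem.Int.mod n 2 = 0
    · -- even step
      have hev' : n % 2 = 0 := by rw [mod_two_eq] at hev; exact hev
      have hm2 : m % 2 = 0 := by omega
      have hm0 : m ≠ 0 := by omega
      have hn' : PySem.Int.floordiv n 2 ≠ 0 := by
        rw [floordiv_two_eq]; omega
      have hna : (PySem.Int.floordiv n 2).natAbs = m / 2 := by
        rw [floordiv_two_eq]; omega
      have hlt : m / 2 < m := by omega
      rw [dif_pos ⟨hn, hev⟩]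
      rw [ih (m / 2) hlt (PySem.Int.floordiv n 2) (x + 1) hn' hna]
      rw [pvTz_even m hm0 hm2, shiftRight_succ_fdiv]
      simp only [Prod.mk.injEq]
      refine ⟨by push_cast; ring, trivial⟩
    · -- odd: loop stops
      have hodd : n % 2 = 1 := by
        rw [mod_two_eq] at hev; omega
      have hm1 : m % 2 = 1 := by omega
      rw [dif_neg (fun hc => hev hc.2), pvTz_odd m hm1]
      simp

-- ===== VERDICT (by name: the statement is the Claim_ definition above) =====
theorem inverse_pair_spec : Claim_equal_inverse_pair := by
  intro result _hd hpre
  unfold Spec_inverse_pair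
  simp only [inverse_pair, inverse_pair_alt]
  have hn : result + 1 ≠ 0 := by
    unfold Pre_inverse_pair at hpre; omega
  rw [loop_eq (result + 1).natAbs (result + 1) 0 hn rfl, alt_x_eq (result + 1) hn]
  have htn : ((pvTz (result + 1).natAbs : Int)).toNat = pvTz (result + 1).natAbs := by omega
  rw [htn]
  simp
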